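-- pv_equiv track=rewrite | github.com/lyzsk/leetcode-solutions | python-solutions/2437-number-of-valid-clock-times/solution.py | countTime
-- ===== SOURCE A (Python) =====
-- def countTime(time: str) -> int:
--     hrCnt = 0
--     minCnt = 0
--     for i in range(24):
--         fstHr = i // 10
--         secHr = i % 10
--         if (time[0] == '?' or int(time[0]) == fstHr) and (time[1] == '?' or int(time[1]) == secHr):
--             hrCnt += 1
--     for i in range(60):
--         fstMin = i // 10
--         secMin = i % 10
--         if (time[3] == '?' or int(time[3]) == fstMin) and (time[4] == '?' or int(time[4]) == secMin):
--             minCnt += 1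
--     return hrCnt * minCnt
-- ===== SOURCE B (Python) =====
-- def countTime(time: str) -> int:
--     t0, t1, t3, t4 = time[0], time[1], time[3], time[4]
--     if t0 == '?':
--         h = 24 if t1 == '?' else (3 if int(t1) <= 3 else 2)
--     elif int(t0) > 2:
--         h = 0
--     elif t1 == '?':
--         h = 10 if int(t0) < 2 else 4
--     else:
--         h = 1 if int(t0) * 10 + int(t1) < 24 else 0
--     if t3 == '?':
--         m = 6 * (10 if t4 == '?' else 1)
--     elif int(t3) > 5:
--         m = 0
--     else:
--         m = 10 if t4 == '?' else 1
--     return h * m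
-- ===== Notes on version B (the rewrite author's own statement) =====
-- stated objective: simpler
-- what changed: Replaced the two brute-force loops over all 24 hours and 60 minutes by a closed-form case analysis on the four mask characters, returning the product of the hour and minute counts.
-- outside the precondition, e.g. on countTime('??:9'): A returns 0, B raises IndexError
import Mathlib
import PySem

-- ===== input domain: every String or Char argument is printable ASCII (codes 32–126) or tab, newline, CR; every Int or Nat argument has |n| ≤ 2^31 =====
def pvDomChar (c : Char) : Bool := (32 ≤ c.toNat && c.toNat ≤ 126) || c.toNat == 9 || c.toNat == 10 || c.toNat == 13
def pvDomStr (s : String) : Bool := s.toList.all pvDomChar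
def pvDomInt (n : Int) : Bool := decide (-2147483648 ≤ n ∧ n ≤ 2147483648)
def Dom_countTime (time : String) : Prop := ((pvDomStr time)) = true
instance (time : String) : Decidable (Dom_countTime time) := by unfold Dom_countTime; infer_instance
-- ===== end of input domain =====

-- B replaces A's two brute-force loops over 0..23 and 0..59 by a closed-form case analysis
-- on the four mask digits (objective: simpler). Equivalence is over the return value only.

-- shared helpers: char at index (exact inside Pre_, which guarantees the index is in range)
-- and the numeric value of a digit character (= Python's int(c) on a digit, exact inside Pre_).
def chAt (s : String) (i : Int) : Char := (PySem.Str.pyGet? s i).getD ' '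
def dv (c : Char) : Int := (c.toNat : Int) - 48

-- ===== PORT A =====
def hrA (c0 c1 : Char) : Int :=
  (PySem.List.pyRange 0 24 1).foldl (fun acc i =>
    let fstHr := PySem.Int.floordiv i 10
    let secHr := PySem.Int.mod i 10
    if (c0 = '?' ∨ dv c0 = fstHr) ∧ (c1 = '?' ∨ dv c1 = secHr) then acc + 1 else acc) 0

def minA (c3 c4 : Char) : Int :=
  (PySem.List.pyRange 0 60 1).foldl (fun acc i =>
    let fstMin := PySem.Int.floordiv i 10
    let secMin := PySem.Int.mod i 10
    if (c3 = '?' ∨ dv c3 = fstMin) ∧ (c4 = '?' ∨ dv c4 = secMin) then acc + 1 else acc) 0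

def countTime (time : String) : Int :=
  hrA (chAt time 0) (chAt time 1) * minA (chAt time 3) (chAt time 4)

-- ===== PORT B =====
def hrB (t u : Char) : Int :=
  if t = '?' then (if u = '?' then 24 else if dv u ≤ 3 then 3 else 2)
  else if dv t > 2 then 0
  else if u = '?' then (if dv t < 2 then 10 else 4)
  else if dv t * 10 + dv u < 24 then 1 else 0

def minB (t u : Char) : Int :=
  if t = '?' then 6 * (if u = '?' then 10 else 1)
  else if dv t > 5 then 0
  else (if u = '?' then 10 else 1)

def countTime_alt (time : String) : Int :=
  hrB (chAt time 0) (chAt time 1) * minB (chAt time 3) (chAt time 4)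

-- ===== PRECONDITION & SPEC =====
def pvDigs : List Char := ['0','1','2','3','4','5','6','7','8','9','?']

-- Pre_ excludes exactly the inputs on which Python A raises (IndexError/ValueError), plus
-- strings shorter than 5 on which A may still return 0 by short-circuit without ever
-- reading time[4], while B always reads time[4] and raises IndexError there.
def Pre_countTime (time : String) : Prop :=
  5 ≤ (PySem.Str.len time) ∧
  chAt time 0 ∈ pvDigs ∧
  ((chAt time 0 = '?' ∨ dv (chAt time 0) ≤ 2) → chAt time 1 ∈ pvDigs) ∧
  chAt time 3 ∈ pvDigs ∧
  ((chAt time 3 = '?' ∨ dv (chAt time 3) ≤ 5) → chAt time 4 ∈ pvDigs)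
instance (time : String) : Decidable (Pre_countTime time) := by unfold Pre_countTime; infer_instance

def pvWitness_countTime : String := "2?:3?"

def Spec_countTime (time : String) (out : Int) : Prop := out = countTime_alt time
instance (time : String) (out : Int) : Decidable (Spec_countTime time out) := by unfold Spec_countTime; infer_instance

-- ===== CLAIM (what is proved, stated in full; the proofs are below) =====
def Claim_equal_countTime : Prop := ∀ (time : String), Dom_countTime time → Pre_countTime time → Spec_countTime time (countTime time)

-- ===== LEMMAS AND PROOFS =====
theorem hr_eq_small : ∀ c0 ∈ ['?','0','1','2'], ∀ c1 ∈ pvDigs, hrA c0 c1 = hrB c0 c1 := by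
  intro c0 h0 c1 h1; fin_cases h0 <;> fin_cases h1 <;> decide

theorem foldl_no_tens (c0 c1 : Char) (hq : c0 ≠ '?') (l : List Int)
    (h : ∀ i ∈ l, dv c0 ≠ PySem.Int.floordiv i 10) (acc : Int) :
    l.foldl (fun acc i =>
      if (c0 = '?' ∨ dv c0 = PySem.Int.floordiv i 10) ∧ (c1 = '?' ∨ dv c1 = PySem.Int.mod i 10)
      then acc + 1 else acc) acc = acc := by
  induction l generalizing acc with
  | nil => rfl
  | cons x xs ih =>
    rw [List.foldl_cons, if_neg]
    · exact ih (fun i hi => h i (List.mem_cons_of_mem _ hi)) acc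
    · rintro ⟨h1 | h1, -⟩
      · exact hq h1
      · exact h x (List.mem_cons_self) h1

theorem hr_eq_big : ∀ c0 ∈ ['3','4','5','6','7','8','9'], ∀ c1 : Char, hrA c0 c1 = hrB c0 c1 := by
  intro c0 hc0 c1
  fin_cases hc0 <;>
    (rw [show ∀ c, hrA c c1 = (PySem.List.pyRange 0 24 1).foldl (fun acc i =>
        if (c = '?' ∨ dv c = PySem.Int.floordiv i 10) ∧ (c1 = '?' ∨ dv c1 = PySem.Int.mod i 10)
        then acc + 1 else acc) 0 from fun _ => rfl,
      foldl_no_tens _ c1 (by decide) _ (by decide) 0] <;> norm_num [hrB, dv] <;> rw [if_neg (by decide), if_pos (by decide)])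

theorem min_eq_small : ∀ c3 ∈ ['?','0','1','2','3','4','5'], ∀ c4 ∈ pvDigs, minA c3 c4 = minB c3 c4 := by
  intro c3 h3 c4 h4; fin_cases h3 <;> fin_cases h4 <;> decide

theorem min_eq_big : ∀ c3 ∈ ['6','7','8','9'], ∀ c4 : Char, minA c3 c4 = minB c3 c4 := by
  intro c3 hc3 c4
  fin_cases hc3 <;>
    (rw [show ∀ c, minA c c4 = (PySem.List.pyRange 0 60 1).foldl (fun acc i =>
        if (c = '?' ∨ dv c = PySem.Int.floordiv i 10) ∧ (c4 = '?' ∨ dv c4 = PySem.Int.mod i 10)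
        then acc + 1 else acc) 0 from fun _ => rfl,
      foldl_no_tens _ c4 (by decide) _ (by decide) 0] <;> norm_num [minB, dv] <;> rw [if_neg (by decide), if_pos (by decide)])

theorem hr_eq (c0 c1 : Char) (h0 : c0 ∈ pvDigs)
    (h1 : (c0 = '?' ∨ dv c0 ≤ 2) → c1 ∈ pvDigs) : hrA c0 c1 = hrB c0 c1 := by
  fin_cases h0
  · exact hr_eq_small '0' (by decide) c1 (h1 (by decide))
  · exact hr_eq_small '1' (by decide) c1 (h1 (by decide))
  · exact hr_eq_small '2' (by decide) c1 (h1 (by decide))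
  · exact hr_eq_big '3' (by decide) c1
  · exact hr_eq_big '4' (by decide) c1
  · exact hr_eq_big '5' (by decide) c1
  · exact hr_eq_big '6' (by decide) c1
  · exact hr_eq_big '7' (by decide) c1
  · exact hr_eq_big '8' (by decide) c1
  · exact hr_eq_big '9' (by decide) c1
  · exact hr_eq_small '?' (by decide) c1 (h1 (by decide))

theorem min_eq (c3 c4 : Char) (h3 : c3 ∈ pvDigs)
    (h4 : (c3 = '?' ∨ dv c3 ≤ 5) → c4 ∈ pvDigs) : minA c3 c4 = minB c3 c4 := by
  fin_cases h3
  · exact min_eq_small '0' (by decide) c4 (h4 (by decide))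
  · exact min_eq_small '1' (by decide) c4 (h4 (by decide))
  · exact min_eq_small '2' (by decide) c4 (h4 (by decide))
  · exact min_eq_small '3' (by decide) c4 (h4 (by decide))
  · exact min_eq_small '4' (by decide) c4 (h4 (by decide))
  · exact min_eq_small '5' (by decide) c4 (h4 (by decide))
  · exact min_eq_big '6' (by decide) c4
  · exact min_eq_big '7' (by decide) c4
  · exact min_eq_big '8' (by decide) c4
  · exact min_eq_big '9' (by decide) c4
  · exact min_eq_small '?' (by decide) c4 (h4 (by decide))

-- ===== VERDICT (by name: the statement is the Claim_ definition above) =====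
theorem countTime_spec : Claim_equal_countTime := by
  intro time _ hpre
  obtain ⟨_, h0, h1, h3, h4⟩ := hpre
  show countTime time = countTime_alt time
  unfold countTime countTime_alt
  rw [hr_eq _ _ h0 h1, min_eq _ _ h3 h4]
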